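-- pv_equiv track=rewrite | github.com/PaarthIyer/AoC2025 | day8/problem2.py | spanning_tree_last_edge
-- ===== SOURCE A (Python) =====
-- def spanning_tree_last_edge(edges: list[tuple[int, int]]) -> tuple[int, int]:
--     parent = {}
--
--     def find(x):
--         if x not in parent:
--             parent[x] = x
--         if parent[x] != x:
--             parent[x] = find(parent[x])
--         return parent[x]
--
--     def union(x, y):
--         px, py = find(x), find(y)
--         if px != py:
--             parent[px] = py
--             return True
--         return False
--
--     last_edge = None
--     for edge in edges:
--         a, b = edge
--         if union(a, b):
--             last_edge = edge
--
--     return last_edge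
-- ===== SOURCE B (Python) =====
-- def spanning_tree_last_edge(edges: list[tuple[int, int]]) -> tuple[int, int]:
--     # Flat component-label map instead of a union-find forest: comp maps each
--     # seen node to its component representative; merging relabels one side.
--     comp = {}
--     last_edge = None
--     for edge in edges:
--         a, b = edge
--         ra = comp.get(a, a)
--         rb = comp.get(b, b)
--         if ra != rb:
--             comp[a] = ra
--             comp[b] = rb
--             for k in comp:
--                 if comp[k] == ra:
--                     comp[k] = rb
--             last_edge = edge
--     return last_edge
-- ===== Notes on version B (the rewrite author's own statement) =====
-- stated objective: alternative
-- what changed: Replaces the union-find forest (parent dict with recursive find and path compression) by a flat node-to-component-label dictionary: an edge merges two components by relabelling every node of one component, so there is no parent chain, no recursion and no compression.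
import Mathlib
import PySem

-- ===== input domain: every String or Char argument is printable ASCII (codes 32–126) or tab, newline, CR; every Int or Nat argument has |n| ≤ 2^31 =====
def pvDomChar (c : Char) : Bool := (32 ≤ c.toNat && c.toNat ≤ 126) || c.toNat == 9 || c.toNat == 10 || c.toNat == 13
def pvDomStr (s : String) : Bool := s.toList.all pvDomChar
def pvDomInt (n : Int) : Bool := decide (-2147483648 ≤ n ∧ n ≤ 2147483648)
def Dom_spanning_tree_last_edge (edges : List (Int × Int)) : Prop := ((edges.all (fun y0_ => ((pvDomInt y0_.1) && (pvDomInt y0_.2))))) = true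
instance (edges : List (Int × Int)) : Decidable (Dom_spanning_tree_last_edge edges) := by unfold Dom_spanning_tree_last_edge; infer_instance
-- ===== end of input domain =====

-- B replaces A's union-find forest (path compression + parent pointers) by a flat
-- node→component-label dictionary that relabels the merged component; same return value,
-- objective: alternative data structure / decomposition (not claimed faster).

-- ===== PORT A =====
-- find(x) of A, recursion made total by fuel (Python recursion always terminates here;
-- the proof supplies fuel > the parent-chain length, so fuel exhaustion is never hit).
def findA : Nat → PySem.Dict Int Int → Int → Int × PySem.Dict Int Int
  | 0, p, x => (x, p)
  | fuel+1, p, x =>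
    -- if x not in parent: parent[x] = x
    let p1 := if p.contains x then p else p.insert x x
    -- if parent[x] != x: parent[x] = find(parent[x])
    let px := p1.getD x x
    if px ≠ x then
      let r := findA fuel p1 px
      let p2 := r.2.insert x r.1
      (p2.getD x x, p2)        -- return parent[x]
    else
      (px, p1)                 -- return parent[x]

-- union(x, y) of A
def unionA (fuel : Nat) (p : PySem.Dict Int Int) (x y : Int) : Bool × PySem.Dict Int Int :=
  let fx := findA fuel p x
  let fy := findA fuel fx.2 y
  if fx.1 ≠ fy.1 then (true, fy.2.insert fx.1 fy.1) else (false, fy.2)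

-- loop body: a, b = edge; if union(a, b): last_edge = edge
def stepA (fuel : Nat) (st : PySem.Dict Int Int × Option (Int × Int)) (e : Int × Int) :
    PySem.Dict Int Int × Option (Int × Int) :=
  let u := unionA fuel st.1 e.1 e.2
  (u.2, if u.1 then some e else st.2)

def spanning_tree_last_edge (edges : List (Int × Int)) : Option (Int × Int) :=
  (edges.foldl (stepA (edges.length + 1)) (PySem.Dict.empty, none)).2

-- ===== PORT B =====
-- for k in comp: if comp[k] == ra: comp[k] = rb
def relabelB (c : PySem.Dict Int Int) (ra rb : Int) : PySem.Dict Int Int :=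
  c.keys.foldl (fun c k => if c.getD k k = ra then c.insert k rb else c) c

-- loop body of B
def stepB (st : PySem.Dict Int Int × Option (Int × Int)) (e : Int × Int) :
    PySem.Dict Int Int × Option (Int × Int) :=
  let ra := st.1.getD e.1 e.1
  let rb := st.1.getD e.2 e.2
  if ra ≠ rb then
    (relabelB ((st.1.insert e.1 ra).insert e.2 rb) ra rb, some e)
  else
    st

def spanning_tree_last_edge_alt (edges : List (Int × Int)) : Option (Int × Int) :=
  (edges.foldl stepB (PySem.Dict.empty, none)).2

-- ===== PRECONDITION & SPEC =====
def Spec_spanning_tree_last_edge (edges : List (Int × Int)) (out : Option (Int × Int)) : Prop := out = spanning_tree_last_edge_alt edges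
instance (edges : List (Int × Int)) (out : Option (Int × Int)) : Decidable (Spec_spanning_tree_last_edge edges out) := by unfold Spec_spanning_tree_last_edge; infer_instance

-- ===== CLAIM (what is proved, stated in full; the proofs are below) =====
def Claim_equal_spanning_tree_last_edge : Prop := ∀ (edges : List (Int × Int)), Dom_spanning_tree_last_edge edges → Spec_spanning_tree_last_edge edges (spanning_tree_last_edge edges)

-- ===== LEMMAS AND PROOFS =====

-- representative of x in B's component map
def repD (c : PySem.Dict Int Int) (x : Int) : Int := c.getD x x

-- "r is the root of x in A's parent forest, reached in n parent steps"
inductive RootN (p : PySem.Dict Int Int) : Int → Int → Nat → Prop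
  | base0 {x : Int} : p.get? x = none → RootN p x x 0
  | base1 {x : Int} : p.get? x = some x → RootN p x x 0
  | step {x y r : Int} {n : Nat} : p.get? x = some y → y ≠ x → RootN p y r n → RootN p x r (n+1)

theorem rootN_unique {p : PySem.Dict Int Int} {x r : Int} {n : Nat}
    (h1 : RootN p x r n) : ∀ {s : Int} {m : Nat}, RootN p x s m → r = s := by
  induction h1 with
  | base0 hx =>
    intro s m h2
    cases h2 with
    | base0 _ => rfl
    | base1 _ => rfl
    | step hx' _ _ => simp [hx] at hx'
  | base1 hx =>
    intro s m h2
    cases h2 with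
    | base0 hx' => simp [hx] at hx'
    | base1 _ => rfl
    | step hx' hne _ => simp [hx] at hx'; exact absurd hx'.symm hne
  | step hx hne htail ih =>
    intro s m h2
    cases h2 with
    | base0 hx' => simp [hx] at hx'
    | base1 hx' => simp [hx'] at hx; exact absurd hx.symm hne
    | step hx' hne' htail' =>
      rw [hx] at hx'
      have hyy := Option.some_injective _ hx'
      subst hyy
      exact ih htail'

theorem rootN_last {p : PySem.Dict Int Int} {x r : Int} {n : Nat}
    (h : RootN p x r n) : p.get? r = none ∨ p.get? r = some r := by
  induction h with
  | base0 hx => exact Or.inl hx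
  | base1 hx => exact Or.inr hx
  | step _ _ _ ih => exact ih

theorem rootN_root_elim {p : PySem.Dict Int Int} {x r : Int} {n : Nat}
    (hroot : p.get? x = none ∨ p.get? x = some x) (h : RootN p x r n) : r = x ∧ n = 0 := by
  cases h with
  | base0 _ => exact ⟨rfl, rfl⟩
  | base1 _ => exact ⟨rfl, rfl⟩
  | step hx hne _ =>
    rcases hroot with h0 | h0
    · rw [hx] at h0; cases h0
    · rw [hx] at h0; exact absurd (Option.some_injective _ h0) hne

-- inserting x ↦ (root of x) (path compression / first-touch insert) preserves all roots
theorem insert_pres {p : PySem.Dict Int Int} {x r : Int} {nr : Nat}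
    (hr : RootN p x r nr) :
    ∀ {y s : Int} {m : Nat}, RootN p y s m → ∃ m' ≤ m, RootN (p.insert x r) y s m' := by
  intro y s m h
  induction h with
  | @base0 y hy =>
    by_cases hyx : y = x
    · subst hyx
      obtain ⟨hrx, -⟩ := rootN_root_elim (Or.inl hy) hr
      subst hrx
      exact ⟨0, le_refl 0, RootN.base1 (by simp [PySem.Dict.get?_insert])⟩
    · exact ⟨0, le_refl 0, RootN.base0 (by simp [PySem.Dict.get?_insert, hyx, hy])⟩
  | @base1 y hy =>
    by_cases hyx : y = x
    · subst hyx
      obtain ⟨hrx, -⟩ := rootN_root_elim (Or.inr hy) hr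
      subst hrx
      exact ⟨0, le_refl 0, RootN.base1 (by simp [PySem.Dict.get?_insert])⟩
    · exact ⟨0, le_refl 0, RootN.base1 (by simp [PySem.Dict.get?_insert, hyx, hy])⟩
  | @step w z sr n hy hne htail ih =>
    by_cases hyx : w = x
    · have hs : r = sr := rootN_unique hr (hyx ▸ RootN.step hy hne htail)
      by_cases hrx : r = x
      · refine ⟨0, by omega, ?_⟩
        rw [hyx, ← hs]
        rw [hrx]
        exact RootN.base1 (by simp)
      · refine ⟨1, by omega, ?_⟩
        rw [hyx, ← hs]
        refine RootN.step (by simp [PySem.Dict.get?_insert]) hrx ?_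
        rcases rootN_last hr with h0 | h0
        · exact RootN.base0 (by simp [PySem.Dict.get?_insert, hrx, h0])
        · exact RootN.base1 (by simp [PySem.Dict.get?_insert, hrx, h0])
    · obtain ⟨m'', hle, hder⟩ := ih
      exact ⟨m''+1, by omega, RootN.step (by simp [PySem.Dict.get?_insert, hyx, hy]) hne hder⟩

-- the union write p[px] = py redirects exactly the px-rooted nodes to py
theorem union_pres {p : PySem.Dict Int Int} {px py : Int}
    (hx : p.get? px = some px) (hy : p.get? py = some py) (hne : px ≠ py) :
    ∀ {y s : Int} {m : Nat}, RootN p y s m →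
      ∃ m' ≤ m + 1, RootN (p.insert px py) y (if s = px then py else s) m' := by
  intro y s m h
  induction h with
  | @base0 w hw =>
    have hyp : w ≠ px := by intro h0; rw [h0, hx] at hw; cases hw
    refine ⟨0, by omega, ?_⟩
    rw [if_neg hyp]
    exact RootN.base0 (by simp [PySem.Dict.get?_insert, hyp, hw])
  | @base1 w hw =>
    by_cases hyp : w = px
    · refine ⟨1, by omega, ?_⟩
      rw [hyp, if_pos rfl]
      refine RootN.step (y := py) (by simp [PySem.Dict.get?_insert]) (Ne.symm hne) ?_
      exact RootN.base1 (by simp [PySem.Dict.get?_insert, Ne.symm hne, hy])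
    · refine ⟨0, by omega, ?_⟩
      rw [if_neg hyp]
      exact RootN.base1 (by simp [PySem.Dict.get?_insert, hyp, hw])
  | @step w z sr n hw hzy htail ih =>
    have hyp : w ≠ px := by
      intro h0
      rw [h0, hx] at hw
      exact hzy ((Option.some_injective _ hw).symm.trans h0.symm)
    obtain ⟨m'', hle, hder⟩ := ih
    exact ⟨m''+1, by omega, RootN.step (by simp [PySem.Dict.get?_insert, hyp, hw]) hzy hder⟩

-- full characterisation of findA
def findBody (f : Nat) (p1 : PySem.Dict Int Int) (x : Int) : Int × PySem.Dict Int Int :=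
  if p1.getD x x ≠ x then
    (((findA f p1 (p1.getD x x)).2.insert x (findA f p1 (p1.getD x x)).1).getD x x,
     (findA f p1 (p1.getD x x)).2.insert x (findA f p1 (p1.getD x x)).1)
  else (p1.getD x x, p1)

theorem findA_succ (f : Nat) (p : PySem.Dict Int Int) (x : Int) :
    findA (f+1) p x = findBody f (if p.contains x then p else p.insert x x) x := rfl

theorem find_body_core (f : Nat) (p1 : PySem.Dict Int Int) (x r : Int) (n' : Nat)
    (hkey : ∃ v, p1.get? x = some v) (hroot : RootN p1 x r n') (hn : n' < f + 1)
    (ih : ∀ (p : PySem.Dict Int Int) (x r : Int) (n : Nat), RootN p x r n → n < f →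
      (findA f p x).1 = r ∧
      (findA f p x).2.get? r = some r ∧
      (∀ y, p.get? y = some y → (findA f p x).2.get? y = some y) ∧
      (∀ y s m, RootN p y s m → ∃ m' ≤ m, RootN (findA f p x).2 y s m')) :
    (findBody f p1 x).1 = r ∧
    (findBody f p1 x).2.get? r = some r ∧
    (∀ y, p1.get? y = some y → (findBody f p1 x).2.get? y = some y) ∧
    (∀ y s m, RootN p1 y s m → ∃ m' ≤ m, RootN (findBody f p1 x).2 y s m') := by
  obtain ⟨v, hv⟩ := hkey
  have hgetD : p1.getD x x = v := by
    rw [PySem.Dict.getD_eq_get?_getD, hv]; rfl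
  unfold findBody
  by_cases hpx : p1.getD x x ≠ x
  · rw [if_pos hpx]
    rw [hgetD] at hpx ⊢
    -- the root derivation must start with a step to v
    cases hroot with
    | base0 h0 => rw [hv] at h0; cases h0
    | base1 h0 => rw [hv] at h0; exact absurd (Option.some_injective _ h0) hpx
    | @step _ y _ k hy hne htail =>
      have hyv : v = y := by rw [hv] at hy; exact Option.some_injective _ hy
      subst hyv
      have hk : k < f := by omega
      obtain ⟨ih1, ih2, ih3, ih4⟩ := ih p1 v r k htail hk
      rw [ih1]
      have hRx : ∃ nn, RootN (findA f p1 v).2 x r nn ∧ nn ≤ k + 1 := by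
        obtain ⟨m', hm', hd⟩ := ih4 x r (k+1) (RootN.step hv hpx htail)
        exact ⟨m', hd, by omega⟩
      obtain ⟨nn, hRx, -⟩ := hRx
      refine ⟨by simp, ?_, ?_, ?_⟩
      · by_cases hrxeq : r = x
        · simp [PySem.Dict.get?_insert, hrxeq]
        · simp [PySem.Dict.get?_insert, hrxeq, ih2]
      · intro y hy1
        have h2 := ih3 y hy1
        by_cases hyx : y = x
        · subst hyx
          obtain ⟨hre, -⟩ := rootN_root_elim (Or.inr h2) hRx
          simp [PySem.Dict.get?_insert, ← hre, h2]
        · simp [PySem.Dict.get?_insert, hyx, h2]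
      · intro y s m hm
        obtain ⟨m1, hle1, hd1⟩ := ih4 y s m hm
        obtain ⟨m2, hle2, hd2⟩ := insert_pres hRx hd1
        exact ⟨m2, by omega, hd2⟩
  · rw [if_neg hpx]
    rw [ne_eq, not_not] at hpx
    rw [hpx] at hgetD
    have hself : p1.get? x = some x := by rw [hv, ← hgetD]
    obtain ⟨hre, -⟩ := rootN_root_elim (Or.inr hself) hroot
    refine ⟨by rw [hpx, hre], ?_, fun y hy => hy, fun y s m hm => ⟨m, le_refl m, hm⟩⟩
    rw [hre]
    exact hself

theorem find_spec : ∀ (fuel : Nat) (p : PySem.Dict Int Int) (x r : Int) (n : Nat),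
    RootN p x r n → n < fuel →
    (findA fuel p x).1 = r ∧
    (findA fuel p x).2.get? r = some r ∧
    (∀ y, p.get? y = some y → (findA fuel p x).2.get? y = some y) ∧
    (∀ y s m, RootN p y s m → ∃ m' ≤ m, RootN (findA fuel p x).2 y s m') := by
  intro fuel
  induction fuel with
  | zero => intro p x r n h hn; exact absurd hn (Nat.not_lt_zero n)
  | succ f ih =>
    intro p x r n h hn
    rw [findA_succ]
    by_cases hc : p.contains x
    · rw [if_pos hc]
      have hkey : ∃ v, p.get? x = some v := by
        have hcc := PySem.Dict.contains_eq_isSome_get? (d := p) (k := x)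
        rw [hc] at hcc
        exact Option.isSome_iff_exists.mp hcc.symm
      exact find_body_core f p x r n hkey h hn ih
    · rw [if_neg hc]
      have hnone : p.get? x = none := by
        have hcc := PySem.Dict.contains_eq_isSome_get? (d := p) (k := x)
        rw [hcc] at hc
        simpa using hc
      obtain ⟨hre, hn0⟩ := rootN_root_elim (Or.inl hnone) h
      have hroot1 : RootN (p.insert x x) x x 0 := RootN.base1 (by simp [PySem.Dict.get?_insert])
      have hpres1 : ∀ y s m, RootN p y s m → ∃ m' ≤ m, RootN (p.insert x x) y s m' :=
        fun y s m hm => insert_pres (hre ▸ h) hm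
      obtain ⟨c1, c2, c3, c4⟩ := find_body_core f (p.insert x x) x x 0
        ⟨x, by simp [PySem.Dict.get?_insert]⟩ hroot1 (by omega) ih
      refine ⟨by rw [c1, hre], by rw [hre]; exact c2, ?_, ?_⟩
      · intro y hy
        have hyx : y ≠ x := by intro h0; rw [h0, hnone] at hy; cases hy
        exact c3 y (by simp [PySem.Dict.get?_insert, hyx, hy])
      · intro y s m hm
        obtain ⟨m1, hl1, hd1⟩ := hpres1 y s m hm
        obtain ⟨m2, hl2, hd2⟩ := c4 y s m1 hd1
        exact ⟨m2, by omega, hd2⟩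


-- B-side: every value stored in comp is itself a key mapped to itself
def GoodVals (c : PySem.Dict Int Int) : Prop :=
  ∀ k v, c.get? k = some v → c.get? v = some v

theorem repD_get? {c : PySem.Dict Int Int} {x : Int} (hne : repD c x ≠ x) :
    c.get? x = some (repD c x) := by
  unfold repD at hne ⊢
  rw [PySem.Dict.getD_eq_get?_getD] at hne ⊢
  cases h : c.get? x with
  | none => rw [h] at hne; exact absurd rfl hne
  | some w => rfl

theorem repD_eq {c : PySem.Dict Int Int} {x : Int} : repD c x = (c.get? x).getD x := by
  unfold repD; rw [PySem.Dict.getD_eq_get?_getD]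

theorem repD_of_get? {c : PySem.Dict Int Int} {x w : Int} (h : c.get? x = some w) :
    repD c x = w := by
  unfold repD; rw [PySem.Dict.getD_eq_get?_getD, h]; rfl

theorem goodvals_insert_rep {c : PySem.Dict Int Int} (h : GoodVals c) (t : Int) :
    GoodVals (c.insert t (repD c t)) := by
  intro k v hkv
  rw [PySem.Dict.get?_insert] at hkv ⊢
  by_cases hkt : k = t
  · rw [if_pos hkt] at hkv
    have hv : v = repD c t := (Option.some_injective _ hkv).symm
    subst hv
    by_cases hrt : repD c t = t
    · rw [if_pos hrt]
    · rw [if_neg hrt]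
      exact h t _ (repD_get? hrt)
  · rw [if_neg hkt] at hkv
    have hv2 := h k v hkv
    by_cases hvt : v = t
    · subst hvt
      rw [if_pos rfl, repD_of_get? hv2]
    · rw [if_neg hvt]
      exact hv2

theorem relabel_fold : ∀ (ks : List Int) (c : PySem.Dict Int Int) (ra rb : Int),
    ks.Nodup → (∀ k ∈ ks, (c.get? k).isSome) →
    ((ks.foldl (fun c k => if c.getD k k = ra then c.insert k rb else c) c).keys = c.keys) ∧
    (∀ x, (ks.foldl (fun c k => if c.getD k k = ra then c.insert k rb else c) c).get? x =
      if x ∈ ks ∧ c.get? x = some ra then some rb else c.get? x) := by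
  intro ks
  induction ks with
  | nil => intro c ra rb _ _; exact ⟨rfl, fun x => by simp⟩
  | cons k t ihk =>
    intro c ra rb hnd hsm
    obtain ⟨v, hv⟩ := Option.isSome_iff_exists.mp (hsm k (by simp))
    have hknt : k ∉ t := (List.nodup_cons.mp hnd).1
    have hgd : c.getD k k = v := by rw [PySem.Dict.getD_eq_get?_getD, hv]; rfl
    simp only [List.foldl_cons]
    -- the step dict
    set c' := if c.getD k k = ra then c.insert k rb else c with hc'
    have hget' : ∀ x, c'.get? x = if x = k ∧ v = ra then some rb else c.get? x := by
      intro x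
      rw [hc', hgd]
      by_cases hvra : v = ra
      · rw [if_pos hvra, PySem.Dict.get?_insert]
        by_cases hxk : x = k
        · simp [hxk, hvra]
        · simp [hxk]
      · rw [if_neg hvra]
        simp [hvra]
    have hkeys' : c'.keys = c.keys := by
      rw [hc']
      by_cases hvra : v = ra
      · rw [hgd, if_pos hvra]
        exact PySem.Dict.keys_insert_of_contains c rb (by
          rw [PySem.Dict.contains_eq_isSome_get?, hv]; rfl)
      · rw [hgd, if_neg hvra]
    have hsm' : ∀ x ∈ t, (c'.get? x).isSome := by
      intro x hx
      rw [hget' x]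
      by_cases hcond : x = k ∧ v = ra
      · rw [if_pos hcond]; rfl
      · rw [if_neg hcond]; exact hsm x (by simp [hx])
    obtain ⟨ihkeys, ihget⟩ := ihk c' ra rb (List.nodup_cons.mp hnd).2 hsm'
    refine ⟨by rw [ihkeys, hkeys'], ?_⟩
    intro x
    rw [ihget x, hget' x]
    by_cases hxk : x = k
    · subst hxk
      have hxt : x ∉ t := hknt
      by_cases hvra : v = ra
      · simp [hxt, hvra, hv]
      · simp [hxt, hvra, hv]
    · simp only [if_neg (fun hh : x = k ∧ v = ra => hxk hh.1)]
      by_cases hxt : x ∈ t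
      · simp [hxt, hxk]
      · simp [hxt, hxk]

-- coupling invariant after k union-successes
def CoupInv (k : Nat) (p c : PySem.Dict Int Int) : Prop :=
  GoodVals c ∧ c.keys.Nodup ∧ ∀ x, ∃ n ≤ k, RootN p x (repD c x) n

theorem unionA_eq (fuel : Nat) (p : PySem.Dict Int Int) (x y : Int) :
    unionA fuel p x y =
      if (findA fuel p x).1 ≠ (findA fuel (findA fuel p x).2 y).1 then
        (true, (findA fuel (findA fuel p x).2 y).2.insert (findA fuel p x).1
          (findA fuel (findA fuel p x).2 y).1)
      else (false, (findA fuel (findA fuel p x).2 y).2) := rfl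

theorem stepA_eq (fuel : Nat) (st : PySem.Dict Int Int × Option (Int × Int)) (e : Int × Int) :
    stepA fuel st e = ((unionA fuel st.1 e.1 e.2).2,
      if (unionA fuel st.1 e.1 e.2).1 then some e else st.2) := rfl

theorem stepB_eq (st : PySem.Dict Int Int × Option (Int × Int)) (e : Int × Int) :
    stepB st e =
      if st.1.getD e.1 e.1 ≠ st.1.getD e.2 e.2 then
        (relabelB ((st.1.insert e.1 (st.1.getD e.1 e.1)).insert e.2 (st.1.getD e.2 e.2))
          (st.1.getD e.1 e.1) (st.1.getD e.2 e.2), some e)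
      else st := rfl

theorem step_sim (fuel k : Nat) (p c : PySem.Dict Int Int) (le : Option (Int × Int))
    (e : Int × Int) (h : CoupInv k p c) (hk : k < fuel) :
    (stepA fuel (p, le) e).2 = (stepB (c, le) e).2 ∧
    CoupInv (k+1) (stepA fuel (p, le) e).1 (stepB (c, le) e).1 := by
  obtain ⟨hgv, hnd, hroots⟩ := h
  obtain ⟨na, hna, hraD⟩ := hroots e.1
  obtain ⟨ha1, ha2, ha3, ha4⟩ := find_spec fuel p e.1 (repD c e.1) na hraD (by omega)
  have hroots1 : ∀ x, ∃ n ≤ k, RootN (findA fuel p e.1).2 x (repD c x) n := by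
    intro x
    obtain ⟨n, hn, hd⟩ := hroots x
    obtain ⟨m, hm, hd2⟩ := ha4 x _ n hd
    exact ⟨m, by omega, hd2⟩
  obtain ⟨nb, hnb, hrbD⟩ := hroots1 e.2
  obtain ⟨hb1, hb2, hb3, hb4⟩ :=
    find_spec fuel (findA fuel p e.1).2 e.2 (repD c e.2) nb hrbD (by omega)
  have hroots2 : ∀ x, ∃ n ≤ k,
      RootN (findA fuel (findA fuel p e.1).2 e.2).2 x (repD c x) n := by
    intro x
    obtain ⟨n, hn, hd⟩ := hroots1 x
    obtain ⟨m, hm, hd2⟩ := hb4 x _ n hd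
    exact ⟨m, by omega, hd2⟩
  have hra2 : (findA fuel (findA fuel p e.1).2 e.2).2.get? (repD c e.1) =
      some (repD c e.1) := hb3 _ ha2
  rw [stepA_eq, stepB_eq, unionA_eq, ha1, hb1]
  simp only []
  rw [show c.getD e.1 e.1 = repD c e.1 from rfl, show c.getD e.2 e.2 = repD c e.2 from rfl]
  by_cases hne : repD c e.1 ≠ repD c e.2
  · rw [if_pos hne, if_pos hne]
    refine ⟨rfl, ?_⟩
    -- B-side facts
    have hab : e.1 ≠ e.2 := fun h0 => hne (by rw [h0])
    have hgv1 : GoodVals (c.insert e.1 (repD c e.1)) := goodvals_insert_rep hgv e.1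
    have hrb1 : repD (c.insert e.1 (repD c e.1)) e.2 = repD c e.2 := by
      unfold repD
      rw [PySem.Dict.getD_insert, if_neg (Ne.symm hab)]
    have hgv2 : GoodVals ((c.insert e.1 (repD c e.1)).insert e.2 (repD c e.2)) := by
      rw [← hrb1]
      exact goodvals_insert_rep hgv1 e.2
    set comp2 := (c.insert e.1 (repD c e.1)).insert e.2 (repD c e.2) with hcomp2
    have hrep2 : ∀ x, repD comp2 x = repD c x := by
      intro x
      unfold repD
      rw [hcomp2, PySem.Dict.getD_insert, PySem.Dict.getD_insert]
      by_cases hx2 : x = e.2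
      · rw [if_pos hx2, hx2]; rfl
      · rw [if_neg hx2]
        by_cases hx1 : x = e.1
        · rw [if_pos hx1, hx1]; rfl
        · rw [if_neg hx1]
    have hnd2 : comp2.keys.Nodup :=
      PySem.Dict.nodup_keys_insert _ _ _ (PySem.Dict.nodup_keys_insert _ _ _ hnd)
    have hsm2 : ∀ x ∈ comp2.keys, (comp2.get? x).isSome := by
      intro x hx
      cases hg : comp2.get? x with
      | none => exact absurd hx ((PySem.Dict.get?_eq_none_iff_not_mem_keys _ _).mp hg)
      | some w => rfl
    obtain ⟨hkeys3, hget3⟩ := relabel_fold comp2.keys comp2 (repD c e.1) (repD c e.2) hnd2 hsm2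
    have hget3' : ∀ x, (relabelB comp2 (repD c e.1) (repD c e.2)).get? x =
        if x ∈ comp2.keys ∧ comp2.get? x = some (repD c e.1) then some (repD c e.2)
        else comp2.get? x := hget3
    have hkeys3' : (relabelB comp2 (repD c e.1) (repD c e.2)).keys = comp2.keys := hkeys3
    -- ra is a key of comp2
    have hraKey : ∃ w, comp2.get? (repD c e.1) = some w := by
      have h1 : (c.insert e.1 (repD c e.1)).get? e.1 = some (repD c e.1) := by
        simp [PySem.Dict.get?_insert]
      have h2 := hgv1 _ _ h1
      rw [hcomp2, PySem.Dict.get?_insert]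
      by_cases hq : repD c e.1 = e.2
      · rw [if_pos hq]; exact ⟨_, rfl⟩
      · rw [if_neg hq]; exact ⟨_, h2⟩
    -- rb is a self-loop of comp2
    have hrbLoop : comp2.get? (repD c e.2) = some (repD c e.2) := by
      refine hgv2 e.2 _ ?_
      rw [hcomp2]
      simp [PySem.Dict.get?_insert]
    have hrep3 : ∀ x, repD (relabelB comp2 (repD c e.1) (repD c e.2)) x =
        if repD c x = repD c e.1 then repD c e.2 else repD c x := by
      intro x
      conv_lhs => rw [repD_eq]
      rw [hget3' x]
      by_cases hx : comp2.get? x = some (repD c e.1)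
      · have hxm : x ∈ comp2.keys := by
          by_contra hxm
          rw [(PySem.Dict.get?_eq_none_iff_not_mem_keys _ _).mpr hxm] at hx
          cases hx
        rw [if_pos ⟨hxm, hx⟩]
        have : repD c x = repD c e.1 := by
          rw [← hrep2 x]
          exact repD_of_get? hx
        rw [if_pos this]
        rfl
      · rw [if_neg (fun hh => hx hh.2)]
        cases hg : comp2.get? x with
        | none =>
          have hxe : x ≠ repD c e.1 := by
            intro h0
            obtain ⟨w, hw⟩ := hraKey
            rw [← h0, hg] at hw
            cases hw
          have : repD c x = x := by
            rw [← hrep2 x, repD_eq, hg]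
            rfl
          rw [this, if_neg hxe]
          rfl
        | some w =>
          have hwra : w ≠ repD c e.1 := fun h0 => hx (by rw [hg, h0])
          have : repD c x = w := by rw [← hrep2 x]; exact repD_of_get? hg
          rw [this, if_neg hwra]
          rfl
    refine ⟨?_, ?_, ?_⟩
    · -- GoodVals of the relabelled dict
      intro kk vv hkk
      rw [hget3' kk] at hkk
      by_cases hcond : kk ∈ comp2.keys ∧ comp2.get? kk = some (repD c e.1)
      · rw [if_pos hcond] at hkk
        have hvv : vv = repD c e.2 := (Option.some_injective _ hkk).symm
        subst hvv
        rw [hget3' _, if_neg (fun hh => hne (Option.some_injective _ (hrbLoop ▸ hh.2)).symm)]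
        exact hrbLoop
      · rw [if_neg hcond] at hkk
        have hvvra : vv ≠ repD c e.1 := by
          intro h0
          have hkm : kk ∈ comp2.keys := by
            by_contra hxm
            rw [(PySem.Dict.get?_eq_none_iff_not_mem_keys _ _).mpr hxm] at hkk
            cases hkk
          exact hcond ⟨hkm, by rw [hkk, h0]⟩
        have hvl := hgv2 kk vv hkk
        rw [hget3' _, if_neg (fun hh => hvvra (Option.some_injective _ (hvl ▸ hh.2)))]
        exact hvl
    · rw [hkeys3']
      exact hnd2
    · intro x
      obtain ⟨n, hn, hd⟩ := hroots2 x
      obtain ⟨m, hm, hd2⟩ := union_pres hra2 hb2 hne hd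
      refine ⟨m, by omega, ?_⟩
      rw [hrep3 x]
      exact hd2
  · rw [if_neg hne, if_neg hne]
    refine ⟨rfl, hgv, hnd, ?_⟩
    intro x
    obtain ⟨n, hn, hd⟩ := hroots2 x
    exact ⟨n, by omega, hd⟩

theorem fold_sim : ∀ (rest : List (Int × Int)) (fuel k : Nat) (p c : PySem.Dict Int Int)
    (le : Option (Int × Int)), CoupInv k p c → k + rest.length < fuel →
    (rest.foldl (stepA fuel) (p, le)).2 = (rest.foldl stepB (c, le)).2 := by
  intro rest
  induction rest with
  | nil => intro fuel k p c le _ _; rfl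
  | cons e t iht =>
    intro fuel k p c le hInv hlen
    simp only [List.foldl_cons]
    obtain ⟨heq, hInv2⟩ := step_sim fuel k p c le e hInv (by simp at hlen; omega)
    have e1 : stepA fuel (p, le) e = ((stepA fuel (p, le) e).1, (stepB (c, le) e).2) := by
      rw [← heq]
    have e2 : stepB (c, le) e = ((stepB (c, le) e).1, (stepB (c, le) e).2) := rfl
    rw [e1, e2]
    exact iht fuel (k+1) _ _ _ hInv2 (by simp at hlen; omega)

-- ===== VERDICT (by name: the statement is the Claim_ definition above) =====
theorem spanning_tree_last_edge_spec : Claim_equal_spanning_tree_last_edge := by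
  intro edges _
  unfold Spec_spanning_tree_last_edge spanning_tree_last_edge spanning_tree_last_edge_alt
  refine fold_sim edges (edges.length + 1) 0 _ _ none ⟨?_, ?_, ?_⟩ (by omega)
  · intro k v h; simp [PySem.Dict.get?_empty] at h
  · simp [PySem.Dict.keys_empty]
  · intro x; exact ⟨0, le_refl 0, RootN.base0 (by simp [PySem.Dict.get?_empty])⟩
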